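-- pv_equiv track=rewrite | github.com/Bolls-Bible/bain | django/bolls/utils/score_search.py | score_search
-- ===== SOURCE A (Python) =====
-- def score_search(text: str, query: str) -> int:
--     if not text or not query:
--         return 0
--
--     search_text = text.lower()
--     score = 0
--     p = 0  # Position within the `text`
--     consecutive_bonus = 2  # Bonus for consecutive matches
--
--     query_length = len(query)
--     for i in range(query_length):
--         index = search_text.find(query[i], p)
--         if index < 0:
--             index = search_text.find(query[i])
--             if index < 0:
--                 continue
--
--         score += 1
--         if index - p < 2:
--             score += consecutive_bonus
--             if index == p:
--                 consecutive_bonus *= 2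
--         else:
--             consecutive_bonus = 2
--
--         p = index + 1
--
--     if query in search_text:
--         score += 2
--
--     if score >= len(query):
--         return score
--
--     return 0
-- ===== SOURCE B (Python) =====
-- def _bisect_left(a, x):
--     # standard library bisect.bisect_left, written out (A imports nothing)
--     lo, hi = 0, len(a)
--     while lo < hi:
--         mid = (lo + hi) // 2
--         if a[mid] < x:
--             lo = mid + 1
--         else:
--             hi = mid
--     return lo
--
--
-- def score_search(text: str, query: str) -> int:
--     if not text or not query:
--         return 0
--
--     search_text = text.lower()
--
--     # One pass over the text: positions[c] = ascending list of the indices where c occurs.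
--     positions = {}
--     for i, ch in enumerate(search_text):
--         positions.setdefault(ch, []).append(i)
--
--     score = 0
--     p = 0
--     bonus = 2
--     for ch in query:
--         occ = positions.get(ch)
--         if occ is None:
--             continue
--         k = _bisect_left(occ, p)  # first occurrence of ch at or after p
--         index = occ[k] if k < len(occ) else occ[0]
--         score += 1
--         if index - p < 2:
--             score += bonus
--             if index == p:
--                 bonus *= 2
--         else:
--             bonus = 2
--         p = index + 1
--
--     if query in search_text:
--         score += 2
--
--     return score if score >= len(query) else 0
-- ===== Notes on version B (the rewrite author's own statement) =====
-- stated objective: alternative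
-- what changed: A rescans the text with str.find for every query character; B builds a per-character index of occurrence positions in one pass over the text and answers each query character with a hand-written binary search (bisect_left) in that character's position list, turning the per-character work into O(log n).
import Mathlib
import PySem

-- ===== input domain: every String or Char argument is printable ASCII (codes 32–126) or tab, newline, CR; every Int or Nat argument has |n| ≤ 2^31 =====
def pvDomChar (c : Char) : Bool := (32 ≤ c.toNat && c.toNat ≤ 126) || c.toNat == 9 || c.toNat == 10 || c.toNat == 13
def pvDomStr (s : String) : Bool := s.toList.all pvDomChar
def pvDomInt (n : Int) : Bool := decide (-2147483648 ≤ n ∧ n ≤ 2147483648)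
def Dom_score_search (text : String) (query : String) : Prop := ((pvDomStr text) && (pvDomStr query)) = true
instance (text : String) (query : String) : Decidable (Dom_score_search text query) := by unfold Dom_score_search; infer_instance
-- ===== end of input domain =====

-- B replaces A's per-query-character scans of the text (str.find from p, then from 0) by a
-- per-character index of occurrence positions built in one pass plus binary search (alternative
-- algorithm; not measured faster: A's scans run inside C-level str.find).

-- ===== PORT A =====
-- one iteration of A's loop over the query characters; state = (score, p, consecutive_bonus)
def scoreStepA (t : List Char) (st : Int × Int × Int) (c : Char) : Int × Int × Int :=
  let i0 := PySem.Chars.findFrom t [c] st.2.1 none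
  let index := if i0 < 0 then PySem.Chars.find t [c] else i0
  if index < 0 then st
  else
    let score := st.1 + 1
    if index - st.2.1 < 2 then
      (score + st.2.2, index + 1, if index = st.2.1 then st.2.2 * 2 else st.2.2)
    else
      (score, index + 1, (2 : Int))

def score_search (text : String) (query : String) : Int :=
  if text.toList = [] ∨ query.toList = [] then 0
  else
    let t := PySem.Chars.lower text.toList
    let st := (PySem.List.pyRange 0 (PySem.List.len query.toList) 1).foldl
      (fun st i => scoreStepA t st (PySem.List.pyGetD query.toList i ' ')) (0, 0, 2)
    let score := if PySem.Chars.isIn query.toList t then st.1 + 2 else st.1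
    if PySem.List.len query.toList ≤ score then score else 0

-- ===== PORT B =====
-- positions[c] = ascending list of the indices at which c occurs (Source B's setdefault/append loop)
def buildPositions (t : List Char) : PySem.Dict Char (List Int) :=
  (PySem.List.enumerate t 0).foldl (fun d q => d.modify q.2 [] (fun l => l ++ [q.1])) PySem.Dict.empty

-- one iteration of B's loop; Source B's hand-written _bisect_left is the standard bisect_left
-- binary-search loop, ported as the prelude's PySem.List.bisectLeft.  occ[k] / occ[0] are
-- ported with the total pyGetD (exact here: every stored position list is nonempty).
def scoreStepB (pos : PySem.Dict Char (List Int)) (st : Int × Int × Int) (c : Char) : Int × Int × Int :=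
  match pos.get? c with
  | none => st
  | some occ =>
    let k := PySem.List.bisectLeft occ st.2.1
    let index := if (k : Int) < PySem.List.len occ then PySem.List.pyGetD occ (k : Int) 0
                 else PySem.List.pyGetD occ 0 0
    let score := st.1 + 1
    if index - st.2.1 < 2 then
      (score + st.2.2, index + 1, if index = st.2.1 then st.2.2 * 2 else st.2.2)
    else
      (score, index + 1, (2 : Int))

def score_search_alt (text : String) (query : String) : Int :=
  if text.toList = [] ∨ query.toList = [] then 0
  else
    let t := PySem.Chars.lower text.toList
    let pos := buildPositions t
    let st := query.toList.foldl (scoreStepB pos) (0, 0, 2)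
    let score := if PySem.Chars.isIn query.toList t then st.1 + 2 else st.1
    if PySem.List.len query.toList ≤ score then score else 0

-- ===== PRECONDITION & SPEC =====
def Spec_score_search (text : String) (query : String) (out : Int) : Prop := out = score_search_alt text query
instance (text : String) (query : String) (out : Int) : Decidable (Spec_score_search text query out) := by unfold Spec_score_search; infer_instance

-- ===== CLAIM (what is proved, stated in full; the proofs are below) =====
def Claim_equal_score_search : Prop := ∀ (text : String) (query : String), Dom_score_search text query → Spec_score_search text query (score_search text query)

-- ===== LEMMAS AND PROOFS =====

-- the ascending list of the indices of c in t
def occL (t : List Char) (c : Char) : List Int :=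
  ((PySem.List.enumerate t 0).filter (fun q => q.2 == c)).map (fun q => q.1)

theorem buildPositions_eq (t : List Char) :
    buildPositions t = ((PySem.List.enumerate t 0).map (fun q => (q.2, q.1))).foldl
      (fun d p => d.modify p.1 [] (fun l => l ++ [p.2])) PySem.Dict.empty := by
  unfold buildPositions
  rw [List.foldl_map]

theorem buildPositions_getD (t : List Char) (c : Char) :
    (buildPositions t).getD c [] = occL t c := by
  rw [buildPositions_eq, PySem.Dict.getD_foldl_modify_append]
  unfold occL
  simp [List.filter_map, List.map_map, Function.comp_def]

theorem buildPositions_keys_mem (t : List Char) (c : Char) :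
    c ∈ (buildPositions t).keys ↔ c ∈ t := by
  rw [buildPositions_eq]
  rw [PySem.Dict.keys_foldl_modify_key]
  rw [PySem.Set.mem_update]
  simp [PySem.Dict.keys_empty, List.map_map, Function.comp_def, PySem.List.map_snd_enumerate]

theorem buildPositions_get?_none (t : List Char) (c : Char) :
    (buildPositions t).get? c = none ↔ c ∉ t := by
  rw [← buildPositions_keys_mem]
  unfold PySem.Dict.get? PySem.Dict.keys
  simp only [Option.map_eq_none_iff, List.find?_eq_none, List.mem_map, beq_iff_eq, not_exists]
  tauto

theorem buildPositions_get?_some (t : List Char) (c : Char) (hc : c ∈ t) :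
    (buildPositions t).get? c = some (occL t c) := by
  have hne : (buildPositions t).get? c ≠ none := by
    intro h
    exact (buildPositions_get?_none t c).mp h hc
  rcases ho : (buildPositions t).get? c with _ | occ
  · exact absurd ho hne
  · have := buildPositions_getD t c
    unfold PySem.Dict.getD at this
    rw [ho] at this
    simpa using congrArg some this

theorem occL_mem (t : List Char) (c : Char) (j : Int) :
    j ∈ occL t c ↔ 0 ≤ j ∧ ∃ h : j.toNat < t.length, t[j.toNat] = c := by
  unfold occL
  simp only [List.mem_map, List.mem_filter, PySem.List.mem_enumerate_iff, beq_iff_eq]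
  constructor
  · rintro ⟨q, ⟨⟨k, hk, rfl⟩, hc⟩, rfl⟩
    simp only [zero_add]
    refine ⟨Int.natCast_nonneg _, ?_⟩
    simp only [Int.toNat_natCast]
    exact ⟨hk, hc⟩
  · rintro ⟨h0, hk, hc⟩
    refine ⟨(j, c), ⟨⟨j.toNat, hk, ?_⟩, rfl⟩, rfl⟩
    simp [hc, Int.toNat_of_nonneg h0]

theorem occL_sorted (t : List Char) (c : Char) : (occL t c).Pairwise (· < ·) := by
  unfold occL
  refine List.Pairwise.map _ (fun a b h => h) ?_
  exact ((PySem.List.pairwise_lt_enumerate t 0).sublist List.filter_sublist)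

theorem infix_drop_iff (t : List Char) (c : Char) (m : Nat) :
    [c] <:+: t.drop m ↔ ∃ j ∈ occL t c, (m : Int) ≤ j := by
  rw [List.singleton_infix_iff, List.mem_iff_getElem]
  constructor
  · rintro ⟨i, hi, hget⟩
    refine ⟨((m + i : Nat) : Int), ?_, by exact_mod_cast Nat.le_add_right m i⟩
    rw [occL_mem]
    refine ⟨Int.natCast_nonneg _, ?_⟩
    rw [Int.toNat_natCast]
    have hlen : m + i < t.length := by
      have := hi; simp [List.length_drop] at this; omega
    exact ⟨hlen, by rw [← List.getElem_drop]; exact hget⟩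
  · rintro ⟨j, hj, hmj⟩
    rw [occL_mem] at hj
    obtain ⟨h0, hlt, hget⟩ := hj
    have hm : m ≤ j.toNat := by omega
    refine ⟨j.toNat - m, by simp [List.length_drop]; omega, ?_⟩
    rw [List.getElem_drop]
    have : m + (j.toNat - m) = j.toNat := by omega
    simp [this, hget]

theorem prefix_drop_of_getElem (t : List Char) (c : Char) (i : Nat) (h : i < t.length)
    (hc : t[i] = c) : [c] <+: t.drop i := by
  have hd : t.drop i = c :: t.drop (i + 1) := by
    rw [List.drop_eq_getElem_cons h, hc]
  rw [hd]
  exact ⟨t.drop (i + 1), rfl⟩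

theorem getElem_of_prefix_drop (t : List Char) (c : Char) (i : Nat)
    (h : [c] <+: t.drop i) : ∃ hi : i < t.length, t[i] = c := by
  obtain ⟨u, hu⟩ := h
  have hlen : i < t.length := by
    by_contra hge
    rw [List.drop_eq_nil_of_le (by omega)] at hu
    simp at hu
  refine ⟨hlen, ?_⟩
  rw [List.drop_eq_getElem_cons hlen] at hu
  injection hu with h1 h2
  exact h1.symm

theorem sorted_getElem_le (l : List Int) (h : l.Pairwise (· ≤ ·)) (i j : Nat)
    (hij : i ≤ j) (hj : j < l.length) : l[i] ≤ l[j] := by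
  rcases Nat.lt_or_ge i j with h' | h'
  · exact List.pairwise_iff_getElem.mp h i j (by omega) hj h'
  · have : i = j := by omega
    subst this; rfl

theorem index_eq (t : List Char) (c : Char) (p : Int) (hc : c ∈ t)
    (hp0 : 0 ≤ p) (hpl : p ≤ (t.length : Int)) :
    (let i0 := PySem.Chars.findFrom t [c] p none
     if i0 < 0 then PySem.Chars.find t [c] else i0)
    = (let occ := occL t c
       let k := PySem.List.bisectLeft occ p
       if (k : Int) < PySem.List.len occ then PySem.List.pyGetD occ (k : Int) 0
       else PySem.List.pyGetD occ 0 0) := by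
  obtain ⟨pn, rfl⟩ := Int.eq_ofNat_of_zero_le hp0
  have hS := occL_sorted t c
  have hS' : (occL t c).Pairwise (· ≤ ·) := hS.imp (fun h => le_of_lt h)
  obtain ⟨hkle, hlt, hge⟩ := PySem.List.bisectLeft_spec (occL t c) (pn : Int) hS'
  set occ := occL t c with hocc
  set k := PySem.List.bisectLeft occ (pn : Int) with hk
  have hpn : pn ≤ t.length := by omega
  have hmemocc : ∀ j ∈ occ, 0 ≤ j ∧ ∃ h : j.toNat < t.length, t[j.toNat] = c :=
    fun j hj => (occL_mem t c j).mp hj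
  by_cases hkc : k < occ.length
  · -- an occurrence at or after p exists; both sides return the first one
    have hBmem : occ[k] ∈ occ := List.getElem_mem hkc
    have hBge : (pn : Int) ≤ occ[k] := hge k hkc le_rfl
    obtain ⟨hB0, hBlt, hBc⟩ := hmemocc _ hBmem
    have hinf : [c] <:+: t.drop pn := by
      rw [infix_drop_iff]
      exact ⟨occ[k], hBmem, by omega⟩
    have hne : PySem.Chars.findFrom t [c] (pn : Int) none ≠ -1 := by
      intro h
      rw [PySem.Chars.findFrom_natCast_eq_neg_one_iff t [c] pn hpn] at h
      exact h hinf
    obtain ⟨hr1, hr2, hr3⟩ := PySem.Chars.findFrom_natCast_spec t [c] pn hpn hne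
    set r := PySem.Chars.findFrom t [c] (pn : Int) none with hr
    have hr0 : 0 ≤ r := le_trans (Int.natCast_nonneg pn) hr1
    obtain ⟨hrlt, hrc⟩ := getElem_of_prefix_drop t c r.toNat hr2
    have hrmem : r ∈ occ := by
      rw [occL_mem]; exact ⟨hr0, hrlt, hrc⟩
    obtain ⟨jr, hjr, hjre⟩ := List.mem_iff_getElem.mp hrmem
    have hkjr : k ≤ jr := by
      by_contra hlt'
      have := hlt jr hjr (by omega)
      omega
    have hle1 : occ[k] ≤ r := hjre ▸ sorted_getElem_le occ hS' k jr hkjr hjr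
    have hle2 : r ≤ occ[k] := by
      by_contra hgt
      push Not at hgt
      have hi1 : pn ≤ occ[k].toNat := by omega
      have hi2 : occ[k].toNat < r.toNat := by omega
      exact hr3 occ[k].toNat hi1 hi2 (prefix_drop_of_getElem t c _ hBlt hBc)
    have heq : r = occ[k] := le_antisymm hle2 hle1
    simp only []
    rw [if_neg (by omega : ¬ r < 0)]
    rw [if_pos (by simp [PySem.List.len_eq]; exact_mod_cast hkc)]
    rw [heq]
    simp only [PySem.List.pyGetD_natCast, List.getD_eq_getElem?_getD]
    rw [← hk, List.getElem?_eq_getElem hkc]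
    rfl
  · -- no occurrence at or after p: findFrom = -1, fall back to the first occurrence
    have hkeq : k = occ.length := by omega
    have hnone : ∀ j ∈ occ, j < (pn : Int) := by
      intro j hj
      obtain ⟨jj, hjj, hjje⟩ := List.mem_iff_getElem.mp hj
      have := hlt jj hjj (by omega)
      omega
    have hninf : ¬ [c] <:+: t.drop pn := by
      rw [infix_drop_iff]
      rintro ⟨j, hj, hmj⟩
      have := hnone j hj
      omega
    have hfneg : PySem.Chars.findFrom t [c] (pn : Int) none = -1 := by
      rw [PySem.Chars.findFrom_natCast_eq_neg_one_iff t [c] pn hpn]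
      exact hninf
    have hfind0 : 0 ≤ PySem.Chars.find t [c] := by
      rw [PySem.Chars.find_nonneg_iff, List.singleton_infix_iff]
      exact hc
    obtain ⟨hf2, hf3⟩ := PySem.Chars.find_spec hfind0
    set f := PySem.Chars.find t [c] with hf
    obtain ⟨hflt, hfc⟩ := getElem_of_prefix_drop t c f.toNat hf2
    have hfmem : f ∈ occ := by
      rw [occL_mem]; exact ⟨hfind0, hflt, hfc⟩
    have hocne : occ ≠ [] := List.ne_nil_of_mem hfmem
    have h0lt : 0 < occ.length := List.length_pos_iff.mpr hocne
    have h0mem : occ[0] ∈ occ := List.getElem_mem h0lt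
    obtain ⟨h00, h0l, h0c⟩ := hmemocc _ h0mem
    obtain ⟨j0, hj0, hj0e⟩ := List.mem_iff_getElem.mp hfmem
    have hle1 : occ[0] ≤ f := hj0e ▸ sorted_getElem_le occ hS' 0 j0 (Nat.zero_le _) hj0
    have hle2 : f ≤ occ[0] := by
      by_contra hgt
      push Not at hgt
      have : occ[0].toNat < f.toNat := by omega
      exact hf3 occ[0].toNat this (prefix_drop_of_getElem t c _ h0l h0c)
    have heq : f = occ[0] := le_antisymm hle2 hle1
    simp only []
    rw [if_pos (by omega : (PySem.Chars.findFrom t [c] (pn : Int) none) < 0)]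
    rw [if_neg (by simp [PySem.List.len_eq]; omega)]
    rw [heq]
    simp only [PySem.List.pyGetD_zero, List.getD_eq_getElem?_getD]
    rw [List.getElem?_eq_getElem h0lt]
    rfl

def ssInv (t : List Char) (st : Int × Int × Int) : Prop :=
  0 ≤ st.2.1 ∧ st.2.1 ≤ (t.length : Int)

theorem step_eq (t : List Char) (st : Int × Int × Int) (c : Char) (h : ssInv t st) :
    scoreStepA t st c = scoreStepB (buildPositions t) st c := by
  obtain ⟨hp0, hpl⟩ := h
  by_cases hc : c ∈ t
  · unfold scoreStepA scoreStepB
    rw [buildPositions_get?_some t c hc]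
    have hidx := index_eq t c st.2.1 hc hp0 hpl
    simp only [] at hidx ⊢
    rw [← hidx]
    have hnn : ¬ ((if PySem.Chars.findFrom t [c] st.2.1 none < 0 then PySem.Chars.find t [c]
        else PySem.Chars.findFrom t [c] st.2.1 none) < 0) := by
      split_ifs with h0
      · have : 0 ≤ PySem.Chars.find t [c] := by
          rw [PySem.Chars.find_nonneg_iff, List.singleton_infix_iff]
          exact hc
        omega
      · omega
    rw [if_neg hnn]
  · obtain ⟨pn, hpn⟩ := Int.eq_ofNat_of_zero_le hp0
    have hpnl : pn ≤ t.length := by omega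
    have hfneg : PySem.Chars.find t [c] = -1 := by
      rw [PySem.Chars.find_eq_neg_one_iff, List.singleton_infix_iff]
      exact hc
    have hffneg : PySem.Chars.findFrom t [c] st.2.1 none = -1 := by
      rw [hpn, PySem.Chars.findFrom_natCast_eq_neg_one_iff t [c] pn hpnl,
        List.singleton_infix_iff]
      intro hmem
      exact hc (List.mem_of_mem_drop hmem)
    unfold scoreStepA scoreStepB
    rw [(buildPositions_get?_none t c).mpr hc]
    simp only [hffneg, hfneg]
    norm_num

theorem step_inv (t : List Char) (st : Int × Int × Int) (c : Char) (h : ssInv t st) :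
    ssInv t (scoreStepA t st c) := by
  obtain ⟨hp0, hpl⟩ := h
  obtain ⟨pn, hpn⟩ := Int.eq_ofNat_of_zero_le hp0
  have hpnl : pn ≤ t.length := by omega
  unfold scoreStepA
  simp only []
  set i0 := PySem.Chars.findFrom t [c] st.2.1 none with hi0
  by_cases h0 : i0 < 0
  · rw [if_pos h0]
    by_cases hf : PySem.Chars.find t [c] < 0
    · rw [if_pos hf]; exact ⟨hp0, hpl⟩
    · rw [if_neg hf]
      push Not at hf
      obtain ⟨hf2, _⟩ := PySem.Chars.find_spec hf
      obtain ⟨hlt', _⟩ := getElem_of_prefix_drop t c _ hf2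
      have hfl : PySem.Chars.find t [c] ≤ (t.length : Int) := PySem.Chars.find_le_length t [c]
      constructor
      · split_ifs <;> first | omega | (dsimp only; omega)
      · split_ifs <;> first | omega | (dsimp only; omega)
  · rw [if_neg h0]
    push Not at h0
    have hne' : PySem.Chars.findFrom t [c] (pn : Int) none ≠ -1 := by
      rw [← hpn, ← hi0]; omega
    obtain ⟨hr1, hr2, _⟩ := PySem.Chars.findFrom_natCast_spec t [c] pn hpnl hne'
    obtain ⟨hlt', _⟩ := getElem_of_prefix_drop t c _ hr2
    rw [if_neg (by omega : ¬ i0 < 0)]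
    have hi0e : i0 = PySem.Chars.findFrom t [c] (pn : Int) none := by rw [hi0, hpn]
    rw [← hi0e] at hr1 hr2
    constructor
    · split_ifs <;> first | omega | (dsimp only; omega)
    · split_ifs <;> first | omega | (dsimp only; omega)

theorem fold_eq (t : List Char) (l : List Char) :
    ∀ st, ssInv t st → l.foldl (scoreStepA t) st = l.foldl (scoreStepB (buildPositions t)) st := by
  intro st h
  induction l generalizing st with
  | nil => rfl
  | cons c l ih =>
    simp only [List.foldl_cons]
    rw [← step_eq t st c h]
    exact ih _ (step_inv t st c h)

-- ===== VERDICT (by name: the statement is the Claim_ definition above) =====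
theorem score_search_spec : Claim_equal_score_search := by
  intro text query _
  unfold Spec_score_search score_search score_search_alt
  by_cases hg : text.toList = [] ∨ query.toList = []
  · rw [if_pos hg, if_pos hg]
  · rw [if_neg hg, if_neg hg]
    have hfold : (PySem.List.pyRange 0 (PySem.List.len query.toList) 1).foldl
        (fun st i => scoreStepA (PySem.Chars.lower text.toList) st (PySem.List.pyGetD query.toList i ' '))
        ((0 : Int), (0 : Int), (2 : Int))
        = query.toList.foldl (scoreStepB (buildPositions (PySem.Chars.lower text.toList))) (0, 0, 2) := by
      rw [PySem.List.foldl_pyRange_zero_pyGetD query.toList ' '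
        (scoreStepA (PySem.Chars.lower text.toList)) ((0 : Int), (0 : Int), (2 : Int))]
      exact fold_eq _ _ _ ⟨le_refl 0, Int.natCast_nonneg _⟩
    dsimp only
    rw [hfold]
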